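-- pv_equiv track=rewrite | github.com/luketlancaster/wego-star-tracker | src/wego_metroboard/leds.py | state_for
-- ===== SOURCE A (Python) =====
-- from enum import StrEnum
--
-- class LedState(StrEnum):
--     OFF = "off"
--     OUTBOUND = "outbound"
--     INBOUND = "inbound"
--     BOTH = "both"
--
-- def state_for(directions: set[int], outbound_id: int) -> LedState:
--     """Resolve a single station's LED state from its active direction_ids."""
--     if not directions:
--         return LedState.OFF
--     has_out = outbound_id in directions
--     has_in = any(d != outbound_id for d in directions)
--     if has_out and has_in:
--         return LedState.BOTH
--     return LedState.OUTBOUND if has_out else LedState.INBOUND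
-- ===== SOURCE B (Python) =====
-- def state_for(directions: set, outbound_id: int):
--     """Resolve a single station's LED state from its active direction_ids."""
--     state = "off"
--     for d in directions:
--         label = "outbound" if d == outbound_id else "inbound"
--         if state == "off":
--             state = label
--         elif state != label:
--             state = "both"
--     return state
-- ===== Notes on version B (the rewrite author's own statement) =====
-- stated objective: alternative
-- what changed: Replaces A's two staged boolean tests (membership + any(!=) scan) feeding a decision table by a single fold over the set with a 4-state accumulator: each direction is mapped to its label and joined into the running state (off absorbs the label, a conflicting label yields both).
import Mathlib
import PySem

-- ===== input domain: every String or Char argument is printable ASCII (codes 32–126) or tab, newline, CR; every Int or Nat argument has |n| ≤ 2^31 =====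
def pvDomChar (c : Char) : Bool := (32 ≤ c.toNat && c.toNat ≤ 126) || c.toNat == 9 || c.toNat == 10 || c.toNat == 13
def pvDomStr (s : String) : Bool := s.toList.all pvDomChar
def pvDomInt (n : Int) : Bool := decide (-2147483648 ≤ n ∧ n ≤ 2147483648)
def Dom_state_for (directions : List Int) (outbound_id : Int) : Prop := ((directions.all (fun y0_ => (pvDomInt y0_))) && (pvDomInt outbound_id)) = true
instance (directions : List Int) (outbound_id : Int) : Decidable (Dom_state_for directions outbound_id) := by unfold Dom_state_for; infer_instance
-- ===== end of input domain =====

-- B replaces A's staged boolean tests + decision table by one fold with a 4-state accumulator; objective: alternative.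

-- ===== PORT A =====
def state_for (directions : List Int) (outbound_id : Int) : String :=
  if directions = [] then "off"
  else
    let has_out := directions.contains outbound_id
    let has_in := directions.any (fun d => d != outbound_id)
    if has_out && has_in then "both"
    else if has_out then "outbound" else "inbound"

-- ===== PORT B =====
-- join of the running state with one direction's label
def ledStep (outbound_id : Int) (state : String) (d : Int) : String :=
  let label := if d = outbound_id then "outbound" else "inbound"
  if state = "off" then label
  else if state ≠ label then "both"
  else state

def state_for_alt (directions : List Int) (outbound_id : Int) : String :=
  directions.foldl (ledStep outbound_id) "off"

-- ===== PRECONDITION & SPEC =====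
def Spec_state_for (directions : List Int) (outbound_id : Int) (out : String) : Prop := out = state_for_alt directions outbound_id
instance (directions : List Int) (outbound_id : Int) (out : String) : Decidable (Spec_state_for directions outbound_id out) := by unfold Spec_state_for; infer_instance

-- ===== CLAIM (what is proved, stated in full; the proofs are below) =====
def Claim_equal_state_for : Prop := ∀ (directions : List Int) (outbound_id : Int), Dom_state_for directions outbound_id → Spec_state_for directions outbound_id (state_for directions outbound_id)

-- ===== LEMMAS AND PROOFS =====

lemma foldl_from_both (a : Int) (xs : List Int) :
    xs.foldl (ledStep a) "both" = "both" := by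
  induction xs with
  | nil => rfl
  | cons x t ih => by_cases h : x = a <;> simp [List.foldl, ledStep, h, ih]

lemma foldl_from_outbound (a : Int) (xs : List Int) :
    xs.foldl (ledStep a) "outbound" =
      (if xs.any (fun d => d != a) then "both" else "outbound") := by
  induction xs with
  | nil => rfl
  | cons x t ih =>
    by_cases h : x = a
    · rw [List.foldl_cons,
        show ledStep a "outbound" x = "outbound" from by simp [ledStep, h],
        show ((x :: t).any (fun d => d != a)) = (t.any (fun d => d != a)) from by simp [h]]
      exact ih
    · simp [List.foldl, ledStep, h, foldl_from_both]

lemma foldl_from_inbound (a : Int) (xs : List Int) :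
    xs.foldl (ledStep a) "inbound" =
      (if xs.contains a then "both" else "inbound") := by
  induction xs with
  | nil => rfl
  | cons x t ih =>
    by_cases h : x = a
    · simp [List.foldl, ledStep, h, foldl_from_both]
    · have hne : ¬ a = x := fun hh => h hh.symm
      simp [List.foldl, ledStep, h, ih, hne]

-- ===== VERDICT (by name: the statement is the Claim_ definition above) =====
theorem state_for_spec : Claim_equal_state_for := by
  intro directions outbound_id _
  unfold Spec_state_for state_for state_for_alt
  cases directions with
  | nil => rfl
  | cons x t =>
    by_cases h : x = outbound_id
    · by_cases ha : t.any (fun d => d != outbound_id) = true <;>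
        simp [List.foldl, ledStep, h, foldl_from_outbound, ha]
    · have hne : ¬ outbound_id = x := fun hh => h hh.symm
      by_cases hc : outbound_id ∈ t <;>
        simp [List.foldl, ledStep, h, hne, foldl_from_inbound, hc]
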